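-- pv_equiv track=rewrite | github.com/SvenHepkema/pyinspect | AutoDoc/FileTypes/PythonFile.py | get_docstrings
-- ===== SOURCE A (Python) =====
-- def get_docstrings(lines):
--     """ Returns dictionary. Keys are line indexes of the class/method statements, value is the corresponding docstring."""
--     text = ''.join(lines).replace("'''",'"""').split('"""') # Join lines to single text, normalize docstring notation, split by docstring delimiter #'''
--     line_index = 0
--
--     doc_strings = {} # Key: line index of start - 1 (So you get the corresponding object (class/method etc.)) Value: Doc string
--
--     for index in range(len(text)):
--         substring = text[index]
--
--         # If it is a docstring
--         if index % 2 == 1: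
--             doc_strings[line_index - 1] = substring
--
--         # Keep track of the line index
--         for character in substring:
--             if character == '\n':
--                 line_index += 1
--
--     return doc_strings
-- ===== SOURCE B (Python) =====
-- def get_docstrings(lines):
--     """ Returns dictionary. Keys are line indexes of the class/method statements, value is the corresponding docstring."""
--     text = ''.join(lines).replace("'''", '"""')
--     doc_strings = {}
--     nl = 0
--     rest = text
--     while True:
--         i = rest.find('"""')
--         if i == -1:
--             return doc_strings
--         nl += rest[:i].count('\n')
--         rest = rest[i + 3:]
--         j = rest.find('"""')
--         body = rest if j == -1 else rest[:j]
--         doc_strings[nl - 1] = body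
--         nl += body.count('\n')
--         rest = '' if j == -1 else rest[j + 3:]
-- ===== Notes on version B (the rewrite author's own statement) =====
-- stated objective: alternative
-- what changed: A joins, normalizes, splits the text into a parts list and runs one fused loop over all parts with a parity test and per-character newline counting; B never materializes the parts list: it streams over the normalized text with str.find, locating each pair of docstring delimiters, slicing the enclosed docstring out directly and keying it by a running newline count (C-level find/count instead of a per-character Python loop).
import Mathlib
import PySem

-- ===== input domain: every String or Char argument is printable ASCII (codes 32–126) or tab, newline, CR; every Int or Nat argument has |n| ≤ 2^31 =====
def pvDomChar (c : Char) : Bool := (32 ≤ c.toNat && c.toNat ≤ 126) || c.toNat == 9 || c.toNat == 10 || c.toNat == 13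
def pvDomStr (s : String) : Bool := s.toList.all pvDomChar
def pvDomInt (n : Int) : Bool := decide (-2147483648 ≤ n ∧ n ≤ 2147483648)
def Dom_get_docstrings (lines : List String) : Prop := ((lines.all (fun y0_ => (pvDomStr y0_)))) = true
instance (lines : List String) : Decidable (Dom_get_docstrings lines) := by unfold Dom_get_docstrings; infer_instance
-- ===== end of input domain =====

-- B replaces A's split-into-parts + parity-indexed fold by a streaming scan of the normalized text:
-- a loop that repeatedly find()s the next pair of '"""' delimiters and records the enclosed docstring,
-- keyed by a running newline count; same asymptotics, measured constant-factor faster.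

-- ===== PORT A =====
def get_docstrings (lines : List String) : List (Int × String) :=
  let text := (PySem.Str.split? (PySem.Str.replace (PySem.Str.join "" lines) "'''" "\"\"\"") "\"\"\"").getD []
  (((PySem.List.pyRange 0 (PySem.List.len text) 1).foldl
      (fun (st : Int × PySem.Dict Int String) index =>
        let substring := PySem.List.pyGetD text index ""
        let st1 := if PySem.Int.mod index 2 == 1 then (st.1, st.2.insert (st.1 - 1) substring) else st
        (substring.toList.foldl (fun li c => if c == '\n' then li + 1 else li) st1.1, st1.2))
      ((0 : Int), (PySem.Dict.empty : PySem.Dict Int String))).2).items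

-- ===== PORT B =====
-- the while loop of Source B: state = (rest of the text, newline count so far, dict built so far);
-- the Nat argument is only a totality guard (each iteration consumes at least 3 characters,
-- so rest.length + 1 steps always suffice; see pvLoopB_eq_go below)
def pvLoopB : Nat → List Char → Int → PySem.Dict Int String → PySem.Dict Int String
  | 0, _, _, d => d
  | fuel + 1, rest, nl, d =>
    let i := PySem.Chars.find rest "\"\"\"".toList
    if i = -1 then d
    else
      let nl1 := nl + (PySem.Chars.count (PySem.List.slice rest none (some i)) "\n".toList : Int)
      let rest1 := PySem.List.slice rest (some (i + 3)) none
      let j := PySem.Chars.find rest1 "\"\"\"".toList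
      let body := if j = -1 then rest1 else PySem.List.slice rest1 none (some j)
      let d1 := d.insert (nl1 - 1) (String.ofList body)
      let nl2 := nl1 + (PySem.Chars.count body "\n".toList : Int)
      pvLoopB fuel (if j = -1 then [] else PySem.List.slice rest1 (some (j + 3)) none) nl2 d1

def get_docstrings_alt (lines : List String) : List (Int × String) :=
  let text := PySem.Str.replace (PySem.Str.join "" lines) "'''" "\"\"\""
  (pvLoopB (text.toList.length + 1) text.toList 0 PySem.Dict.empty).items

-- ===== PRECONDITION & SPEC =====
def Spec_get_docstrings (lines : List String) (out : List (Int × String)) : Prop := out = get_docstrings_alt lines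
instance (lines : List String) (out : List (Int × String)) : Decidable (Spec_get_docstrings lines out) := by unfold Spec_get_docstrings; infer_instance

-- ===== CLAIM (what is proved, stated in full; the proofs are below) =====
def Claim_equal_get_docstrings : Prop := ∀ (lines : List String), Dom_get_docstrings lines → Spec_get_docstrings lines (get_docstrings lines)

-- ===== LEMMAS AND PROOFS =====

-- a found 3-char delimiter fits inside the text
lemma pvFind_fit {s sub : List Char} (h : PySem.Chars.find s sub ≠ -1) :
    (PySem.Chars.find s sub).toNat + sub.length ≤ s.length := by
  have h0 : 0 ≤ PySem.Chars.find s sub := by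
    have := PySem.Chars.neg_one_le_find s sub; omega
  have hp := (PySem.Chars.find_spec h0).1
  have hlen := hp.length_le
  rw [List.length_drop] at hlen
  have hle := PySem.Chars.find_le_length s sub
  omega

-- the split segments A starts from
def pvParts (lines : List String) : List String :=
  (PySem.Str.split? (PySem.Str.replace (PySem.Str.join "" lines) "'''" "\"\"\"") "\"\"\"").getD []

def pvNl (p : String) : Int := (p.toList.count '\n' : Int)

-- A's fused loop, recast as structural recursion over the parts with a parity index
def pvGo : List String → Int → Int → PySem.Dict Int String → Int × PySem.Dict Int String
  | [], _, li, d => (li, d)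
  | p :: ps, j, li, d =>
      pvGo ps (j + 1) (li + pvNl p) (if PySem.Int.mod j 2 == 1 then d.insert (li - 1) p else d)

lemma pvCountGo (c : Char) : ∀ (cs : List Char) (fuel acc : Nat), cs.length ≤ fuel →
    PySem.Chars.count.go [c] fuel cs acc = acc + cs.count c := by
  intro cs
  induction cs with
  | nil => intro fuel acc h; cases fuel <;> simp [PySem.Chars.count.go]
  | cons hd tl ih =>
    intro fuel acc h
    cases fuel with
    | zero => simp at h
    | succ f =>
      have htl : tl.length ≤ f := by simp at h; omega
      rw [PySem.Chars.count.go]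
      by_cases hc : c = hd
      · subst hc
        simp [List.isPrefixOf, ih f (acc + 1) htl, List.count_cons]
        omega
      · have hne : ¬ hd = c := fun e => hc e.symm
        simp [List.isPrefixOf, hc, ih f acc htl, List.count_cons, hne]

lemma pvCount_chars (cs : List Char) : PySem.Chars.count cs ['\n'] = cs.count '\n' := by
  show PySem.Chars.count.go ['\n'] cs.length cs 0 = _
  simpa using pvCountGo '\n' cs cs.length 0 le_rfl

lemma pvCount_chars' (cs : List Char) : PySem.Chars.count cs "\n".toList = cs.count '\n' :=
  pvCount_chars cs

def pvStep (st : Int × PySem.Dict Int String) (pr : Int × String) : Int × PySem.Dict Int String :=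
  let st1 := if PySem.Int.mod pr.1 2 == 1 then (st.1, st.2.insert (st.1 - 1) pr.2) else st
  (pr.2.toList.foldl (fun li c => if c == '\n' then li + 1 else li) st1.1, st1.2)

lemma pvStep_eq (li : Int) (d : PySem.Dict Int String) (j : Int) (p : String) :
    pvStep (li, d) (j, p)
    = (li + pvNl p, if PySem.Int.mod j 2 == 1 then d.insert (li - 1) p else d) := by
  by_cases hj : (PySem.Int.mod j 2 == 1) = true
  · simp only [pvStep, if_pos hj, PySem.List.foldl_beq_add_one, pvNl]
  · simp only [pvStep, if_neg hj, PySem.List.foldl_beq_add_one, pvNl]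

lemma pvA_enum (ps : List String) : ∀ (j li : Int) (d : PySem.Dict Int String),
    (PySem.List.enumerate ps j).foldl pvStep (li, d) = pvGo ps j li d := by
  induction ps with
  | nil => intro j li d; simp [PySem.List.enumerate_nil, pvGo]
  | cons p ps ih =>
    intro j li d
    rw [PySem.List.enumerate_cons, List.foldl_cons, pvStep_eq, pvGo, ih]

lemma pvA_fold (text : List String) :
    (PySem.List.pyRange 0 (PySem.List.len text) 1).foldl
      (fun (st : Int × PySem.Dict Int String) index =>
        let substring := PySem.List.pyGetD text index ""
        let st1 := if PySem.Int.mod index 2 == 1 then (st.1, st.2.insert (st.1 - 1) substring) else st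
        (substring.toList.foldl (fun li c => if c == '\n' then li + 1 else li) st1.1, st1.2))
      ((0 : Int), (PySem.Dict.empty : PySem.Dict Int String)) = pvGo text 0 0 PySem.Dict.empty := by
  have hl : (fun (st : Int × PySem.Dict Int String) index =>
        let substring := PySem.List.pyGetD text index ""
        let st1 := if PySem.Int.mod index 2 == 1 then (st.1, st.2.insert (st.1 - 1) substring) else st
        (substring.toList.foldl (fun li c => if c == '\n' then li + 1 else li) st1.1, st1.2))
      = (fun st index => pvStep st (index, PySem.List.pyGetD text index "")) := rfl
  rw [hl]
  have key := pvA_enum text 0 0 PySem.Dict.empty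
  rw [PySem.List.enumerate_eq_map_pyRange text "", List.foldl_map] at key
  exact key

lemma pvA_eq (lines : List String) :
    get_docstrings lines = ((pvGo (pvParts lines) 0 0 PySem.Dict.empty).2).items := by
  simp only [get_docstrings, pvParts]
  rw [pvA_fold]

-- ---- characterising str.split('"""') by repeated find ----

-- first occurrence: a uniqueness characterisation of Chars.find
lemma pvFind_eq {s sub : List Char} (k : Nat) (h1 : sub <+: s.drop k)
    (h2 : ∀ i < k, ¬ sub <+: s.drop i) : PySem.Chars.find s sub = k := by
  have hin : PySem.Chars.isIn sub s = true :=
    (PySem.Chars.exists_prefix_drop_iff_isIn sub s).mp ⟨k, h1⟩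
  have h0 : 0 ≤ PySem.Chars.find s sub := by
    rw [PySem.Chars.find_nonneg_iff]
    exact (PySem.Chars.isIn_iff_infix sub s).mp hin
  obtain ⟨hp, hmin⟩ := PySem.Chars.find_spec h0
  have ht : (PySem.Chars.find s sub).toNat = k := by
    rcases lt_trichotomy (PySem.Chars.find s sub).toNat k with h | h | h
    · exact absurd hp (h2 _ h)
    · exact h
    · exact absurd h1 (hmin _ h)
  omega

lemma pvFind_prefix {s sub : List Char} (h : sub.isPrefixOf s = true) :
    PySem.Chars.find s sub = 0 := by
  apply pvFind_eq 0
  · simpa using List.isPrefixOf_iff_prefix.mp h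
  · intro i hi; omega

lemma pvFind_cons_neg {c : Char} {rest sub : List Char} (h : ¬ sub <+: (c :: rest)) :
    PySem.Chars.find (c :: rest) sub
      = if PySem.Chars.find rest sub = -1 then -1
        else PySem.Chars.find rest sub + 1 := by
  by_cases hr : PySem.Chars.find rest sub = -1
  · rw [if_pos hr]
    rw [PySem.Chars.find_eq_neg_one_iff] at hr ⊢
    intro hinf
    obtain ⟨j, hj⟩ := (PySem.Chars.exists_prefix_drop_iff_isIn sub (c :: rest)).mpr
      ((PySem.Chars.isIn_iff_infix sub (c :: rest)).mpr hinf) |>.imp (fun _ h => h) |> fun _ => by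
        exact (PySem.Chars.exists_prefix_drop_iff_isIn sub (c :: rest)).mpr
          ((PySem.Chars.isIn_iff_infix sub (c :: rest)).mpr hinf)
    cases j with
    | zero => exact h (by simpa using hj)
    | succ j' =>
      exact hr ((PySem.Chars.isIn_iff_infix sub rest).mp
        ((PySem.Chars.exists_prefix_drop_iff_isIn sub rest).mp ⟨j', by simpa using hj⟩))
  · rw [if_neg hr]
    have h0 : 0 ≤ PySem.Chars.find rest sub := by
      have := PySem.Chars.neg_one_le_find rest sub; omega
    obtain ⟨hp, hmin⟩ := PySem.Chars.find_spec h0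
    have := pvFind_eq (s := c :: rest) (sub := sub) ((PySem.Chars.find rest sub).toNat + 1)
      (by simpa using hp)
      (by
        intro i hi
        cases i with
        | zero => simpa using h
        | succ i' => exact fun hpre => hmin i' (by omega) (by simpa using hpre))
    omega

-- one-step unfoldings of splitOn.go
lemma pvGoU_zero (sep l cur : List Char) (acc : List (List Char)) :
    PySem.Chars.splitOn.go sep 0 l cur acc = ((cur.reverse ++ l) :: acc).reverse := by
  rw [PySem.Chars.splitOn.go.eq_def]

lemma pvGoU_nil (sep : List Char) (f : Nat) (cur : List Char) (acc : List (List Char)) :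
    PySem.Chars.splitOn.go sep (f + 1) [] cur acc = (cur.reverse :: acc).reverse := by
  rw [PySem.Chars.splitOn.go.eq_def]

lemma pvGoU_cons (sep : List Char) (f : Nat) (c : Char) (rest cur : List Char) (acc : List (List Char)) :
    PySem.Chars.splitOn.go sep (f + 1) (c :: rest) cur acc
      = if sep.isPrefixOf (c :: rest) = true then
          PySem.Chars.splitOn.go sep f (List.drop sep.length (c :: rest)) [] (cur.reverse :: acc)
        else PySem.Chars.splitOn.go sep f rest (c :: cur) acc := by
  rw [PySem.Chars.splitOn.go.eq_def]

-- accumulator/current-buffer normal form of splitOn.go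
def pvHM (f : List Char → List Char) : List (List Char) → List (List Char)
  | [] => []
  | p :: ps => f p :: ps

lemma pvHM_nil (G : List (List Char)) : pvHM (fun p => [] ++ p) G = G := by
  cases G <;> simp [pvHM]

lemma pvHM_id (G : List (List Char)) : pvHM (fun p => p) G = G := by
  cases G <;> simp [pvHM]

lemma pvGo_out (sep : List Char) : ∀ (fuel : Nat) (l cur : List Char) (acc : List (List Char)),
    PySem.Chars.splitOn.go sep fuel l cur acc
      = acc.reverse ++ pvHM (cur.reverse ++ ·) (PySem.Chars.splitOn.go sep fuel l [] []) := by
  intro fuel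
  induction fuel with
  | zero => intro l cur acc; rw [pvGoU_zero, pvGoU_zero]; simp [pvHM]
  | succ f ih =>
    intro l cur acc
    cases l with
    | nil => rw [pvGoU_nil, pvGoU_nil]; simp [pvHM]
    | cons c rest =>
      rw [pvGoU_cons, pvGoU_cons]
      split
      · simp only [List.reverse_nil]
        rw [ih (List.drop sep.length (c :: rest)) [] (cur.reverse :: acc),
          ih (List.drop sep.length (c :: rest)) [] ([[]] : List (List Char))]
        simp only [List.reverse_nil, List.reverse_cons, List.reverse_singleton]
        cases PySem.Chars.splitOn.go sep f (List.drop sep.length (c :: rest)) [] [] with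
        | nil => simp [pvHM]
        | cons p ps => simp [pvHM]
      · rw [ih rest (c :: cur) acc, ih rest [c] []]
        simp only [List.reverse_nil, List.nil_append, List.reverse_cons, List.reverse_singleton]
        cases PySem.Chars.splitOn.go sep f rest [] [] with
        | nil => simp [pvHM]
        | cons p ps => simp [pvHM]

-- fuel irrelevance for splitOn.go
lemma pvGo_fuel (sep : List Char) (hsep : sep ≠ []) : ∀ (fuel fuel' : Nat) (l cur : List Char)
    (acc : List (List Char)), l.length < fuel → l.length < fuel' →
    PySem.Chars.splitOn.go sep fuel l cur acc = PySem.Chars.splitOn.go sep fuel' l cur acc := by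
  intro fuel
  induction fuel with
  | zero => intro fuel' l cur acc h; omega
  | succ f ih =>
    intro fuel' l cur acc h h'
    cases fuel' with
    | zero => omega
    | succ f' =>
      cases l with
      | nil => rw [pvGoU_nil, pvGoU_nil]
      | cons c rest =>
        have hs1 : 1 ≤ sep.length := List.length_pos_iff.mpr hsep
        simp only [List.length_cons] at h h'
        rw [pvGoU_cons, pvGoU_cons]
        split
        · apply ih
          · simp only [List.length_drop, List.length_cons]; omega
          · simp only [List.length_drop, List.length_cons]; omega
        · apply ih
          · omega
          · omega

-- not-found case: the whole remainder is one part
lemma pvGo_notfound (sep : List Char) (hsep : sep ≠ []) : ∀ (fuel : Nat) (l cur : List Char)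
    (acc : List (List Char)), l.length < fuel → PySem.Chars.find l sep = -1 →
    PySem.Chars.splitOn.go sep fuel l cur acc = acc.reverse ++ [cur.reverse ++ l] := by
  intro fuel
  induction fuel with
  | zero => intro l cur acc h; omega
  | succ f ih =>
    intro l cur acc h hfind
    cases l with
    | nil => rw [pvGoU_nil]; simp
    | cons c rest =>
      rw [pvGoU_cons]
      have hnpre : ¬ sep.isPrefixOf (c :: rest) = true := by
        intro hp
        have := pvFind_prefix hp
        omega
      rw [if_neg hnpre]
      have hninf : ¬ sep <+: (c :: rest) := fun hp => hnpre (List.isPrefixOf_iff_prefix.mpr hp)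
      have hrest : PySem.Chars.find rest sep = -1 := by
        have hstep := pvFind_cons_neg hninf
        by_cases hr : PySem.Chars.find rest sep = -1
        · exact hr
        · rw [if_neg hr] at hstep
          have h0 := PySem.Chars.neg_one_le_find rest sep
          omega
      rw [ih rest (c :: cur) acc (by simp only [List.length_cons] at h; omega) hrest]
      simp

-- found case: one part up to the delimiter, then split of the remainder
lemma pvGo_found (sep : List Char) (hsep : sep ≠ []) : ∀ (fuel : Nat) (l cur : List Char)
    (acc : List (List Char)), l.length < fuel → 0 ≤ PySem.Chars.find l sep →
    PySem.Chars.splitOn.go sep fuel l cur acc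
      = acc.reverse ++ (cur.reverse ++ l.take (PySem.Chars.find l sep).toNat)
          :: PySem.Chars.splitOn (l.drop ((PySem.Chars.find l sep).toNat + sep.length)) sep := by
  intro fuel
  induction fuel with
  | zero => intro l cur acc h; omega
  | succ f ih =>
    intro l cur acc h hfind
    cases l with
    | nil =>
      exfalso
      have := (PySem.Chars.find_nonneg_iff [] sep).mp hfind
      simp at this
      exact hsep this
    | cons c rest =>
      rw [pvGoU_cons]
      simp only [List.length_cons] at h
      have hs1 : 1 ≤ sep.length := List.length_pos_iff.mpr hsep
      by_cases hpre : sep.isPrefixOf (c :: rest) = true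
      · rw [if_pos hpre]
        have hf0 : PySem.Chars.find (c :: rest) sep = 0 := pvFind_prefix hpre
        rw [pvGo_out sep f (List.drop sep.length (c :: rest)) [] (cur.reverse :: acc)]
        have hrec : PySem.Chars.splitOn.go sep f (List.drop sep.length (c :: rest)) [] []
            = PySem.Chars.splitOn (List.drop sep.length (c :: rest)) sep := by
          rw [PySem.Chars.splitOn]
          apply pvGo_fuel sep hsep
          · simp only [List.length_drop, List.length_cons]; omega
          · omega
        rw [hrec, hf0]
        simp [pvHM_nil, pvHM_id]
      · rw [if_neg hpre]
        have hninf : ¬ sep <+: (c :: rest) := fun hp => hpre (List.isPrefixOf_iff_prefix.mpr hp)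
        have hstep := pvFind_cons_neg hninf
        have hr : PySem.Chars.find rest sep ≠ -1 := by
          intro hr
          rw [if_pos hr] at hstep
          omega
        have hr0 : 0 ≤ PySem.Chars.find rest sep := by
          have := PySem.Chars.neg_one_le_find rest sep; omega
        rw [if_neg hr] at hstep
        rw [ih rest (c :: cur) acc (by omega) hr0]
        have ht : (PySem.Chars.find (c :: rest) sep).toNat = (PySem.Chars.find rest sep).toNat + 1 := by
          omega
        have harith : (PySem.Chars.find rest sep).toNat + 1 + sep.length
            = ((PySem.Chars.find rest sep).toNat + sep.length) + 1 := by omega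
        rw [ht, harith, List.take_succ_cons, List.drop_succ_cons]
        simp

-- split('"""') steps by find('"""')
lemma pvSplit_rec (sep : List Char) (hsep : sep ≠ []) (l : List Char) :
    PySem.Chars.splitOn l sep
      = if PySem.Chars.find l sep = -1 then [l]
        else l.take (PySem.Chars.find l sep).toNat
          :: PySem.Chars.splitOn (l.drop ((PySem.Chars.find l sep).toNat + sep.length)) sep := by
  by_cases h : PySem.Chars.find l sep = -1
  · rw [if_pos h]
    have := pvGo_notfound sep hsep (l.length + 1) l [] [] (by omega) h
    simpa [PySem.Chars.splitOn] using this
  · rw [if_neg h]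
    have h0 : 0 ≤ PySem.Chars.find l sep := by
      have := PySem.Chars.neg_one_le_find l sep; omega
    have := pvGo_found sep hsep (l.length + 1) l [] [] (by omega) h0
    simpa [PySem.Chars.splitOn] using this

-- parity index only matters mod 2
lemma pvGo_shift (ps : List String) : ∀ (j li : Int) (d : PySem.Dict Int String),
    pvGo ps (j + 2) li d = pvGo ps j li d := by
  induction ps with
  | nil => intro j li d; rfl
  | cons p ps ih =>
    intro j li d
    have hm : PySem.Int.mod (j + 2) 2 = PySem.Int.mod j 2 := by
      simp [PySem.Int.mod, Int.fmod_eq_emod]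
    rw [pvGo, pvGo, hm, show j + 2 + 1 = (j + 1) + 2 by ring, ih]

lemma pvNl_ofList (cs : List Char) : pvNl (String.ofList cs) = (cs.count '\n' : Int) := by
  simp [pvNl]

lemma pvSepNe : ("\"\"\"".toList) ≠ [] := by decide

lemma pvSplitNil : PySem.Chars.splitOn ([] : List Char) "\"\"\"".toList = [[]] := by
  rw [PySem.Chars.splitOn, pvGoU_nil]
  rfl

lemma pvMod0 : (PySem.Int.mod 0 2 == 1) = false := by decide

lemma pvMod1 : (PySem.Int.mod 1 2 == 1) = true := by decide

-- the main loop invariant: B's delimiter-pair scan computes A's fold over the split parts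
lemma pvLoopB_eq_go : ∀ (n : Nat) (l : List Char), l.length < n → ∀ (nl : Int) (d : PySem.Dict Int String),
    pvLoopB n l nl d = (pvGo ((PySem.Chars.splitOn l "\"\"\"".toList).map String.ofList) 0 nl d).2 := by
  intro n
  induction n with
  | zero => intro l hl nl d; exact absurd hl (Nat.not_lt_zero _)
  | succ n ih =>
    intro l hl nl d
    by_cases hi : PySem.Chars.find l "\"\"\"".toList = -1
    · rw [pvLoopB]
      simp only [hi, pvSplit_rec _ pvSepNe l, if_pos hi]
      simp [pvGo, pvMod0]
    · have h0 : 0 ≤ PySem.Chars.find l "\"\"\"".toList := by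
        have := PySem.Chars.neg_one_le_find l "\"\"\"".toList; omega
      have hfit := pvFind_fit (s := l) (sub := "\"\"\"".toList) hi
      have hsl : ("\"\"\"".toList).length = 3 := rfl
      rw [hsl] at hfit
      have htn : (PySem.Chars.find l "\"\"\"".toList + 3).toNat
          = (PySem.Chars.find l "\"\"\"".toList).toNat + 3 := by omega
      rw [pvLoopB, if_neg hi,
        PySem.List.slice_to _ h0, PySem.List.slice_from _ (by omega), htn,
        pvSplit_rec _ pvSepNe l, if_neg hi, hsl]
      have h1 := PySem.Chars.neg_one_le_find
        (List.drop ((PySem.Chars.find l "\"\"\"".toList).toNat + 3) l) "\"\"\"".toList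
      by_cases hj : PySem.Chars.find
          (List.drop ((PySem.Chars.find l "\"\"\"".toList).toNat + 3) l) "\"\"\"".toList = -1
      · simp only [hj, reduceIte]
        rw [ih [] (by simp only [List.length_nil]; omega), pvSplitNil,
          pvSplit_rec _ pvSepNe (List.drop ((PySem.Chars.find l "\"\"\"".toList).toNat + 3) l),
          if_pos hj]
        simp [pvGo, pvMod0, pvMod1, pvNl_ofList, pvCount_chars, pvCount_chars']
      · have hj0 : 0 ≤ PySem.Chars.find
            (List.drop ((PySem.Chars.find l "\"\"\"".toList).toNat + 3) l) "\"\"\"".toList := by omega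
        simp only [hj, reduceIte]
        rw [PySem.List.slice_to _ hj0, PySem.List.slice_from _ (by omega)]
        have htn2 : (PySem.Chars.find
            (List.drop ((PySem.Chars.find l "\"\"\"".toList).toNat + 3) l) "\"\"\"".toList + 3).toNat
            = (PySem.Chars.find
              (List.drop ((PySem.Chars.find l "\"\"\"".toList).toNat + 3) l) "\"\"\"".toList).toNat + 3 := by
          omega
        rw [htn2]
        rw [ih (List.drop
            ((PySem.Chars.find (List.drop ((PySem.Chars.find l "\"\"\"".toList).toNat + 3) l)
                "\"\"\"".toList).toNat + 3)
            (List.drop ((PySem.Chars.find l "\"\"\"".toList).toNat + 3) l))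
          (by rw [List.length_drop, List.length_drop]; omega)]
        -- (length bound: the scan consumed at least the 3-char delimiter, so at least 3 characters)
        rw [pvSplit_rec _ pvSepNe (List.drop ((PySem.Chars.find l "\"\"\"".toList).toNat + 3) l),
          if_neg hj, hsl]
        simp only [List.map_cons, pvGo, pvMod0, pvMod1, Bool.false_eq_true, if_false, if_true,
          pvNl_ofList, pvCount_chars, pvCount_chars', zero_add]
        rw [show ((1 : Int) + 1) = 0 + 2 by norm_num, pvGo_shift]

lemma pvB_eq (lines : List String) :
    get_docstrings_alt lines = ((pvGo (pvParts lines) 0 0 PySem.Dict.empty).2).items := by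
  have hparts : pvParts lines
      = ((PySem.Chars.splitOn
          (PySem.Str.replace (PySem.Str.join "" lines) "'''" "\"\"\"").toList "\"\"\"".toList).map
            String.ofList) := by
    rw [pvParts, PySem.Str.split?, PySem.Chars.split?]
    simp [pvSepNe]
  rw [get_docstrings_alt, pvLoopB_eq_go _ _ (Nat.lt_succ_self _), hparts]

-- ===== VERDICT (by name: the statement is the Claim_ definition above) =====
theorem get_docstrings_spec : Claim_equal_get_docstrings := by
  intro lines _
  unfold Spec_get_docstrings
  rw [pvA_eq, pvB_eq]
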